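-- pv_equiv track=rewrite | github.com/tkiet79/Coding_Practice | GeeksForGeeks/geeksforgeeks_Make the array beautiful.py | makeBeautiful
-- ===== SOURCE A (Python) =====
-- from typing import List
--
-- def makeBeautiful(arr: List[int]) -> List[int]:
--
--     idx = 1
--     if len(arr) < 2:
--         return arr
--
--     res = []
--     for value in arr:
--         if not res:
--             res.append(value)
--
--         elif (res[-1] < 0 and value >= 0) or (res[-1] >= 0 and value < 0):
--             res.pop()
--
--         else:
--             res.append(value)
--
--     return res
-- ===== SOURCE B (Python) =====
-- from typing import List
--
-- def makeBeautiful(arr: List[int]) -> List[int]: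
--     if len(arr) < 2:
--         return arr
--     res = list(arr)
--     changed = True
--     while changed:
--         changed = False
--         for i in range(len(res) - 1):
--             if (res[i] < 0 and res[i+1] >= 0) or (res[i] >= 0 and res[i+1] < 0):
--                 del res[i+1]
--                 del res[i]
--                 changed = True
--                 break
--     return res
-- ===== Notes on version B (the rewrite author's own statement) =====
-- stated objective: alternative
-- what changed: Replaces the one-pass stack cancellation with a fixpoint of repeated scans, each pass deleting the leftmost adjacent opposite-sign pair from a copy of the list until no such pair remains.
import Mathlib
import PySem

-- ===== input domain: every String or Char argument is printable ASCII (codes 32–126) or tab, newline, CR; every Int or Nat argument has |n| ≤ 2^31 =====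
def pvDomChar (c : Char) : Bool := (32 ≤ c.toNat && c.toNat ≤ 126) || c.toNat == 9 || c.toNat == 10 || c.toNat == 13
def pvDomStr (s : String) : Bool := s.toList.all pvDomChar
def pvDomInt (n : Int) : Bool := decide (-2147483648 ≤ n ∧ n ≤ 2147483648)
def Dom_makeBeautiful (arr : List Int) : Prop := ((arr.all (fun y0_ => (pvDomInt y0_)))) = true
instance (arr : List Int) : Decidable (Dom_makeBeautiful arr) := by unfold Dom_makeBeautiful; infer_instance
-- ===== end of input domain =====

-- B replaces the one-pass stack cancellation with repeated scans deleting the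
-- leftmost adjacent opposite-sign pair until none remains (alternative, not faster).

-- ===== PORT A =====
-- Python's res appends/pops at its end; the port keeps the stack reversed
-- (cons/head/tail) and reverses once at the return, which is exact.
def stackStep (res : List Int) (v : Int) : List Int :=
  match res with
  | [] => [v]                                        -- if not res: res.append(value)
  | h :: t =>
      if (h < 0 ∧ 0 ≤ v) ∨ (0 ≤ h ∧ v < 0) then t   -- res.pop()
      else v :: h :: t                               -- res.append(value)

def makeBeautiful (arr : List Int) : List Int :=
  if arr.length < 2 then arr
  else (arr.foldl stackStep []).reverse

-- ===== PORT B =====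
-- one inner for-scan: delete the leftmost adjacent opposite-sign pair, if any
def removePass : List Int → Option (List Int)
  | a :: b :: rest =>
      if (a < 0 ∧ 0 ≤ b) ∨ (0 ≤ a ∧ b < 0) then some rest
      else (removePass (b :: rest)).map (a :: ·)
  | _ => none

theorem removePass_length : ∀ (res r : List Int), removePass res = some r → res.length = r.length + 2
  | a :: b :: rest, r, h => by
    simp only [removePass] at h
    split at h
    · cases h; simp
    · cases hm : removePass (b :: rest) with
      | none => simp [hm] at h
      | some r' =>
        have ih := removePass_length (b :: rest) r' hm
        simp only [hm, Option.map_some] at h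
        injection h with h; subst h
        simpa using ih

-- the while-changed loop
def bLoop (res : List Int) : List Int :=
  match h : removePass res with
  | none => res
  | some r => bLoop r
termination_by res.length
decreasing_by have := removePass_length res r h; omega

def makeBeautiful_alt (arr : List Int) : List Int :=
  if arr.length < 2 then arr
  else bLoop arr

-- ===== PRECONDITION & SPEC =====
def Spec_makeBeautiful (arr : List Int) (out : List Int) : Prop := out = makeBeautiful_alt arr
instance (arr : List Int) (out : List Int) : Decidable (Spec_makeBeautiful arr out) := by unfold Spec_makeBeautiful; infer_instance

-- ===== CLAIM (what is proved, stated in full; the proofs are below) =====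
def Claim_equal_makeBeautiful : Prop := ∀ (arr : List Int), Dom_makeBeautiful arr → Spec_makeBeautiful arr (makeBeautiful arr)

-- ===== LEMMAS AND PROOFS =====

def OppP (x y : Int) : Prop := (x < 0 ∧ 0 ≤ y) ∨ (0 ≤ x ∧ y < 0)

-- the stack's top (if any) does not cancel the list's head (if any)
def Good (acc res : List Int) : Prop :=
  ∀ x a, acc.head? = some x → res.head? = some a → ¬ OppP x a

theorem good_nil (res : List Int) : Good [] res := by
  intro x a hx _; simp at hx

theorem fold_of_none : ∀ (res acc : List Int), removePass res = none → Good acc res →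
    res.foldl stackStep acc = res.reverse ++ acc
  | [], acc, _, _ => by simp
  | [x], acc, _, hg => by
    cases acc with
    | nil => simp [stackStep]
    | cons h t =>
      have := hg h x rfl rfl
      simp only [List.foldl, stackStep, OppP] at this ⊢
      rw [if_neg this]; simp
  | a :: b :: rest, acc, hn, hg => by
    simp only [removePass] at hn
    split at hn
    · exact absurd hn (by simp)
    next hab =>
    have hn' : removePass (b :: rest) = none := by
      cases hm : removePass (b :: rest) <;> simp [hm] at hn ⊢
    have hstep : stackStep acc a = a :: acc := by
      cases acc with
      | nil => rfl
      | cons h t =>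
        have := hg h a rfl rfl
        simp only [stackStep, OppP] at this ⊢
        rw [if_neg this]
    have hg' : Good (a :: acc) (b :: rest) := by
      intro x y hx hy
      simp at hx hy; subst hx; subst hy
      simpa [OppP] using hab
    calc (a :: b :: rest).foldl stackStep acc
        = (b :: rest).foldl stackStep (a :: acc) := by rw [List.foldl_cons, hstep]
      _ = (b :: rest).reverse ++ a :: acc := fold_of_none (b :: rest) (a :: acc) hn' hg'
      _ = (a :: b :: rest).reverse ++ acc := by simp

theorem fold_of_some : ∀ (res r acc : List Int), removePass res = some r → Good acc res →
    res.foldl stackStep acc = r.foldl stackStep acc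
  | a :: b :: rest, r, acc, h, hg => by
    simp only [removePass] at h
    split at h
    next hab =>
      cases h
      have hstep : stackStep acc a = a :: acc := by
        cases acc with
        | nil => rfl
        | cons hh t =>
          have := hg hh a rfl rfl
          simp only [stackStep, OppP] at this ⊢
          rw [if_neg this]
      have hpop : stackStep (a :: acc) b = acc := by
        simp only [stackStep]
        cases acc <;> rw [if_pos hab]
      rw [List.foldl_cons, hstep, List.foldl_cons, hpop]
    next hab =>
      cases hm : removePass (b :: rest) with
      | none => simp [hm] at h
      | some r' =>
        simp only [hm, Option.map_some] at h
        injection h with h; subst h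
        have hstep : stackStep acc a = a :: acc := by
          cases acc with
          | nil => rfl
          | cons hh t =>
            have := hg hh a rfl rfl
            simp only [stackStep, OppP] at this ⊢
            rw [if_neg this]
        have hg' : Good (a :: acc) (b :: rest) := by
          intro x y hx hy
          simp at hx hy; subst hx; subst hy
          simpa [OppP] using hab
        calc List.foldl stackStep acc (a :: b :: rest)
            = List.foldl stackStep (a :: acc) (b :: rest) := by
              rw [List.foldl_cons, hstep]
          _ = List.foldl stackStep (a :: acc) r' :=
              fold_of_some (b :: rest) r' (a :: acc) hm hg'
          _ = List.foldl stackStep acc (a :: r') := by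
              rw [List.foldl_cons, hstep]

theorem bLoop_eq (res : List Int) : bLoop res = (res.foldl stackStep []).reverse := by
  rw [bLoop.eq_def]
  split
  next h => rw [fold_of_none res [] h (good_nil res)]; simp
  next r h =>
    have hlt := removePass_length res r h
    rw [bLoop_eq r, fold_of_some res r [] h (good_nil res)]
termination_by res.length
decreasing_by omega

-- ===== VERDICT (by name: the statement is the Claim_ definition above) =====
theorem makeBeautiful_spec : Claim_equal_makeBeautiful := by
  intro arr _
  show makeBeautiful arr = makeBeautiful_alt arr
  unfold makeBeautiful makeBeautiful_alt
  split
  · rfl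
  · exact (bLoop_eq arr).symm
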